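-- pv_equiv track=rewrite | github.com/GrabbarnaPython/kval20_uppg5 | FindPaths.py | lookAround
-- ===== SOURCE A (Python) =====
-- def lookAround(x, y, i, lista, coords): #sparar paths
--     lista.append(coords[x][y])
--
--     if i == 1:
--         return lookAround(x, y + 1, i + 1, lista, coords)
--     elif i == 2:
--         return lookAround(x + 1, y, i + 1, lista, coords)
--     elif i == 3:
--         return lookAround(x, y - 1, i + 1, lista, coords)
--     elif i == 4:
--         return lookAround(x, y - 1, i + 1, lista, coords)
--     elif i == 5:
--         return lookAround(x - 1, y, i + 1, lista, coords)
--     elif i == 6: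
--         return lookAround(x - 1, y, i + 1, lista, coords)
--     elif i == 7:
--         return lookAround(x, y + 1, i + 1, lista, coords)
--     elif i == 8:
--         return lookAround(x, y + 1, i + 1, lista, coords)
--     else:
--         return lista
-- ===== SOURCE B (Python) =====
-- _DELTA = {1: (0, 1), 2: (1, 0), 3: (0, -1), 4: (0, -1),
--           5: (-1, 0), 6: (-1, 0), 7: (0, 1), 8: (0, 1)}
--
-- def lookAround(x, y, i, lista, coords):
--     while True:
--         lista.append(coords[x][y])
--         d = _DELTA.get(i)
--         if d is None:
--             return lista
--         x += d[0]
--         y += d[1]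
--         i += 1
-- ===== Notes on version B (the rewrite author's own statement) =====
-- stated objective: idiomatic
-- what changed: Replaced the 8-branch tail recursion with an iterative while-loop driven by a step-delta lookup table.
import Mathlib
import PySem

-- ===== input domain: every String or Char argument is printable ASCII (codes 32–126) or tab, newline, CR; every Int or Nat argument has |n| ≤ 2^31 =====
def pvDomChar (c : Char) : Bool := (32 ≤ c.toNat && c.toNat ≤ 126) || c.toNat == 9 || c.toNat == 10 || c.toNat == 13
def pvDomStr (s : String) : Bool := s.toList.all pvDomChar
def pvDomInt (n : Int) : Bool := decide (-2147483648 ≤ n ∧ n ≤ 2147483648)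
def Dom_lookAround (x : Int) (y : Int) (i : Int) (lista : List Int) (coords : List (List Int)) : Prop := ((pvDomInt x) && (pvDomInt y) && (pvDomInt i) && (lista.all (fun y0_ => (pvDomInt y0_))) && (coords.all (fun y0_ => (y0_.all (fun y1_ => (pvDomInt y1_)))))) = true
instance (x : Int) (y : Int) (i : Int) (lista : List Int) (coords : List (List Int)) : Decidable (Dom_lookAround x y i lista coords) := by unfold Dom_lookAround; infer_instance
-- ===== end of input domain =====

-- B replaces A's 8-branch tail recursion by a while-loop driven by a step-delta table; same
-- return value, and (in Python) the same in-place mutation of `lista`.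

-- shared helper: coords[x][y] with Python indexing; the .getD 0 default is only reachable
-- outside Pre_lookAround (where the Python raises IndexError)
def pvGet2 (coords : List (List Int)) (x y : Int) : Int :=
  ((PySem.List.pyGet? coords x).bind (fun r => PySem.List.pyGet? r y)).getD 0

-- ===== PORT A =====
-- A's tail recursion, structurally encoded: each call does i := i+1 and stops once i leaves
-- 1..8, so from any start the depth is at most 9; fuel 9 is never exhausted (the fuel-0 arm
-- repeats the terminal append-and-return and is unreachable from lookAround).
def lookAroundGo (fuel : Nat) (x : Int) (y : Int) (i : Int) (lista : List Int) (coords : List (List Int)) : List Int :=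
  match fuel with
  | 0 => lista ++ [pvGet2 coords x y]
  | n + 1 =>
    let lista' := lista ++ [pvGet2 coords x y]
    if i = 1 then lookAroundGo n x (y + 1) (i + 1) lista' coords
    else if i = 2 then lookAroundGo n (x + 1) y (i + 1) lista' coords
    else if i = 3 then lookAroundGo n x (y - 1) (i + 1) lista' coords
    else if i = 4 then lookAroundGo n x (y - 1) (i + 1) lista' coords
    else if i = 5 then lookAroundGo n (x - 1) y (i + 1) lista' coords
    else if i = 6 then lookAroundGo n (x - 1) y (i + 1) lista' coords
    else if i = 7 then lookAroundGo n x (y + 1) (i + 1) lista' coords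
    else if i = 8 then lookAroundGo n x (y + 1) (i + 1) lista' coords
    else lista'

def lookAround (x : Int) (y : Int) (i : Int) (lista : List Int) (coords : List (List Int)) : List Int :=
  lookAroundGo 9 x y i lista coords

-- ===== PORT B =====
-- the _DELTA table of Source B
def pvDeltaTable : PySem.Dict Int (Int × Int) :=
  PySem.Dict.ofList [(1, (0, 1)), (2, (1, 0)), (3, (0, -1)), (4, (0, -1)),
                     (5, (-1, 0)), (6, (-1, 0)), (7, (0, 1)), (8, (0, 1))]

-- Source B's while-loop, structurally encoded with the same never-exhausted fuel 9
def lookAroundAltGo (fuel : Nat) (x : Int) (y : Int) (i : Int) (lista : List Int) (coords : List (List Int)) : List Int :=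
  match fuel with
  | 0 => lista ++ [pvGet2 coords x y]
  | n + 1 =>
    let lista' := lista ++ [pvGet2 coords x y]
    match PySem.Dict.get? pvDeltaTable i with
    | none => lista'
    | some d => lookAroundAltGo n (x + d.1) (y + d.2) (i + 1) lista' coords

def lookAround_alt (x : Int) (y : Int) (i : Int) (lista : List Int) (coords : List (List Int)) : List Int :=
  lookAroundAltGo 9 x y i lista coords

-- ===== PRECONDITION & SPEC =====
-- step delta used only by Pre_ (to describe which cells the Python reads)
def pvStep (j : Int) : Int × Int :=
  if j = 2 then (1, 0)
  else if j = 3 ∨ j = 4 then (0, -1)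
  else if j = 5 ∨ j = 6 then (-1, 0)
  else (0, 1)

-- position read at the k-th append when starting from (x, y) with counter i
def pvPosAt (x y i : Int) : Nat → Int × Int
  | 0 => (x, y)
  | k + 1 =>
      let p := pvPosAt x y i k
      let d := pvStep (i + k)
      (p.1 + d.1, p.2 + d.2)

-- how many appends the Python performs
def pvVisits (i : Int) : Nat := if 1 ≤ i ∧ i ≤ 8 then (10 - i).toNat else 1

-- Pre_: every cell the path reads is a valid Python index pair (else A raises IndexError)
def Pre_lookAround (x : Int) (y : Int) (i : Int) (lista : List Int) (coords : List (List Int)) : Prop :=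
  ∀ k < pvVisits i,
    (((PySem.List.pyGet? coords (pvPosAt x y i k).1).bind
        (fun r => PySem.List.pyGet? r (pvPosAt x y i k).2)).isSome) = true
instance (x : Int) (y : Int) (i : Int) (lista : List Int) (coords : List (List Int)) : Decidable (Pre_lookAround x y i lista coords) := by unfold Pre_lookAround; infer_instance

def pvWitness_lookAround : Int × Int × Int × List Int × List (List Int) :=
  (0, 0, 1, [], [[1, 2, 3], [4, 5, 6], [7, 8, 9]])

def Spec_lookAround (x : Int) (y : Int) (i : Int) (lista : List Int) (coords : List (List Int)) (out : List Int) : Prop := out = lookAround_alt x y i lista coords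
instance (x : Int) (y : Int) (i : Int) (lista : List Int) (coords : List (List Int)) (out : List Int) : Decidable (Spec_lookAround x y i lista coords out) := by unfold Spec_lookAround; infer_instance

-- ===== CLAIM (what is proved, stated in full; the proofs are below) =====
def Claim_equal_lookAround : Prop := ∀ (x : Int) (y : Int) (i : Int) (lista : List Int) (coords : List (List Int)), Dom_lookAround x y i lista coords → Pre_lookAround x y i lista coords → Spec_lookAround x y i lista coords (lookAround x y i lista coords)

-- ===== LEMMAS AND PROOFS =====

-- the ports agree on ALL inputs (Pre_ is only needed for the Python side, where A raises)
theorem pvDeltaTable_eq_mk :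
    pvDeltaTable = PySem.Dict.mk [(1, (0, 1)), (2, (1, 0)), (3, (0, -1)), (4, (0, -1)),
                                  (5, (-1, 0)), (6, (-1, 0)), (7, (0, 1)), (8, (0, 1))] := by decide

theorem pvDelta_none {i : Int} (h : ¬(1 ≤ i ∧ i ≤ 8)) :
    PySem.Dict.get? pvDeltaTable i = none := by
  rw [pvDeltaTable_eq_mk]
  simp [PySem.Dict.get?,
        show ¬((1 : Int) = i) by omega, show ¬((2 : Int) = i) by omega,
        show ¬((3 : Int) = i) by omega, show ¬((4 : Int) = i) by omega,
        show ¬((5 : Int) = i) by omega, show ¬((6 : Int) = i) by omega,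
        show ¬((7 : Int) = i) by omega, show ¬((8 : Int) = i) by omega]

theorem pvDelta_some {i : Int} (h1 : 1 ≤ i) (h2 : i ≤ 8) :
    PySem.Dict.get? pvDeltaTable i = some (pvStep i) := by
  interval_cases i <;> decide

-- the two loop bodies agree at every fuel (Pre_ is only needed for the Python side, where A raises)
theorem go_eq_altGo : ∀ (fuel : Nat) (x y i : Int) (lista : List Int) (coords : List (List Int)),
    lookAroundGo fuel x y i lista coords = lookAroundAltGo fuel x y i lista coords := by
  intro fuel
  induction fuel with
  | zero => intro x y i lista coords; rfl
  | succ n ih =>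
    intro x y i lista coords
    rw [lookAroundGo, lookAroundAltGo]
    by_cases h : 1 ≤ i ∧ i ≤ 8
    · obtain ⟨h1, h2⟩ := h
      rw [pvDelta_some h1 h2]
      interval_cases i <;>
        · simp only [pvStep, reduceIte]
          norm_num
          exact ih _ _ _ _ _
    · rw [pvDelta_none h]
      have h1 : i ≠ 1 := by omega
      have h2 : i ≠ 2 := by omega
      have h3 : i ≠ 3 := by omega
      have h4 : i ≠ 4 := by omega
      have h5 : i ≠ 5 := by omega
      have h6 : i ≠ 6 := by omega
      have h7 : i ≠ 7 := by omega
      have h8 : i ≠ 8 := by omega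
      simp [h1, h2, h3, h4, h5, h6, h7, h8]

-- ===== VERDICT (by name: the statement is the Claim_ definition above) =====
theorem lookAround_spec : Claim_equal_lookAround := by
  intro x y i lista coords _ _
  exact go_eq_altGo 9 x y i lista coords
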